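-- pv_equiv track=rewrite | github.com/joaopalet/LEIC-IST | 1st_Year/FP/2nd_Project/proj2-86447.py | encontra_pos
-- ===== SOURCE A (Python) =====
-- def numero(x):
--     '''Funcao que testa se o argumento (x) e um numero'''
--     return isinstance(x, int)
--
-- def faz_pos(l, c):
--     '''Funcao que recebe dois argumentos, l e c, e devolve um argumento do tipo posicao, testando a validade dos argumentos'''
--     if numero(l) and numero(c) and 0 <= l and 0 <= c:
--         return (l, c)
--     else:
--         raise ValueError('faz_pos: argumentos errados')
--
-- def encontra_pos(car, chave):
--     '''Funcao que recebe dois argumentos, um caractere (car) e uma chave, e devolve a posicao correspodente na chave'''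
--     for l in range(len(chave)):             #l corresponde a uma linha da chave
--         if car in chave[l]:
--             linha = l
--             for c in range(len(chave[l])):              #c corresponde a uma coluna da chave
--                 if car == chave[l][c]:
--                     coluna = c
--     return faz_pos(linha, coluna)
-- ===== SOURCE B (Python) =====
-- def encontra_pos(car, chave):
--     '''Last row-major position of car in chave, found by scanning backwards
--     and returning at the first match (A raises on a missing car; that case
--     is outside Pre_, B returns None there).'''
--     for l in range(len(chave) - 1, -1, -1):
--         row = chave[l]
--         for c in range(len(row) - 1, -1, -1):
--             if row[c] == car:
--                 return (l, c)
-- ===== Notes on version B (the rewrite author's own statement) =====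
-- stated objective: alternative
-- what changed: B scans the key backwards (rows and columns in reverse) and returns at the first match, replacing A's full forward sweep of every row with a per-row membership test plus a separate inner rescan.
import Mathlib
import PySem

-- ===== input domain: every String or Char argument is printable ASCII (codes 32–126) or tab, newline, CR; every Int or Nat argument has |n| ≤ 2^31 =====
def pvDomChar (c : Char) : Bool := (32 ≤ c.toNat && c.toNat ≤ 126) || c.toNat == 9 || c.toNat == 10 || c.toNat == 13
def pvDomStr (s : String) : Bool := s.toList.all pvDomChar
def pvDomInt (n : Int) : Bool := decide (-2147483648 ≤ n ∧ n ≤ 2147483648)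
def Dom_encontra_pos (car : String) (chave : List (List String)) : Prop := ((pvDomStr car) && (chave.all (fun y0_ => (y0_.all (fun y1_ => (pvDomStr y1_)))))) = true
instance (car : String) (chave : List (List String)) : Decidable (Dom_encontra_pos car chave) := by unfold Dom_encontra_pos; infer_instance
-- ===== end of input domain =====

-- B scans the key backwards (rows and columns in reverse) and returns at the first
-- match, replacing A's full forward sweep (per-row membership test + inner rescan);
-- alternative decomposition, same worst-case cost.

-- ===== PORT A =====
-- Forward sweep over all rows; `linha`/`coluna` are the possibly-unbound Python
-- locals, modelled as Option Int (Python re-evaluates chave[l] at each use).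
-- On a missing car Python raises UnboundLocalError (excluded by Pre_); the port
-- returns (-1, -1) there.
def encontra_pos (car : String) (chave : List (List String)) : Int × Int :=
  match (PySem.List.pyRange 0 (chave.length : Int) 1).foldl
      (fun (s : Option Int × Option Int) l =>
        if car ∈ PySem.List.pyGetD chave l [] then
          (PySem.List.pyRange 0 (((PySem.List.pyGetD chave l []).length : Int)) 1).foldl
            (fun (t : Option Int × Option Int) c =>
              if car = PySem.List.pyGetD (PySem.List.pyGetD chave l []) c "" then (t.1, some c)
              else t)
            (some l, s.2)
        else s)
      (none, none) with
  | (some l, some c) => (l, c)   -- faz_pos(l, c): l ≥ 0 and c ≥ 0, so it returns (l, c)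
  | _ => (-1, -1)                -- Python raises UnboundLocalError here; excluded by Pre_

-- ===== PORT B =====
-- inner loop: for c in range(len(row)-1, -1, -1): if row[c] == car: return c
def findColRev (car : String) (row : List String) : List Int → Option Int
  | [] => none
  | c :: rest =>
    if PySem.List.pyGetD row c "" = car then some c else findColRev car row rest

-- outer loop: for l in range(len(chave)-1, -1, -1): row = chave[l]; …
def findRowRev (car : String) (chave : List (List String)) : List Int → Option (Int × Int)
  | [] => none
  | l :: rest =>
    let row := PySem.List.pyGetD chave l []
    match findColRev car row (PySem.List.pyRange ((row.length : Int) - 1) (-1) (-1)) with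
    | some c => some (l, c)
    | none => findRowRev car chave rest

def encontra_pos_alt (car : String) (chave : List (List String)) : Int × Int :=
  match findRowRev car chave (PySem.List.pyRange ((chave.length : Int) - 1) (-1) (-1)) with
  | some p => p
  | none => (0, 0)               -- Source B falls off the loop and returns None here; excluded by Pre_

-- ===== PRECONDITION & SPEC =====
-- Pre_ excludes exactly the inputs where car occurs nowhere in chave: there the
-- Python A raises UnboundLocalError (no value is returned) and B returns None.
def Pre_encontra_pos (car : String) (chave : List (List String)) : Prop :=
  ∃ row ∈ chave, car ∈ row
instance (car : String) (chave : List (List String)) : Decidable (Pre_encontra_pos car chave) := by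
  unfold Pre_encontra_pos; infer_instance

def pvWitness_encontra_pos : String × List (List String) := ("b", [["a", "b"], ["c"]])

def Spec_encontra_pos (car : String) (chave : List (List String)) (out : Int × Int) : Prop := out = encontra_pos_alt car chave
instance (car : String) (chave : List (List String)) (out : Int × Int) : Decidable (Spec_encontra_pos car chave out) := by unfold Spec_encontra_pos; infer_instance

-- ===== CLAIM (what is proved, stated in full; the proofs are below) =====
def Claim_equal_encontra_pos : Prop := ∀ (car : String) (chave : List (List String)), Dom_encontra_pos car chave → Pre_encontra_pos car chave → Spec_encontra_pos car chave (encontra_pos car chave)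

-- ===== LEMMAS AND PROOFS =====

-- pyGetD on an appended list, index inside the left part
theorem pvGetD_append_left {α : Type} (xs ys : List α) (i : Int) (d : α)
    (h0 : 0 ≤ i) (h1 : i < (xs.length : Int)) :
    PySem.List.pyGetD (xs ++ ys) i d = PySem.List.pyGetD xs i d := by
  rw [PySem.List.pyGetD_eq_getElem (xs ++ ys) d h0 (by simp; omega),
      PySem.List.pyGetD_eq_getElem xs d h0 h1]
  exact List.getElem_append_left (by omega)

-- pyGetD at the appended element
theorem pvGetD_append_last {α : Type} (xs : List α) (x : α) (d : α) :
    PySem.List.pyGetD (xs ++ [x]) (xs.length : Int) d = x := by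
  rw [PySem.List.pyGetD_eq_getElem (xs ++ [x]) d (by omega) (by simp)]
  simp

-- findColRev only looks at the indices in its list
theorem findColRev_congr (car : String) (xs ys : List String) :
    ∀ cs : List Int, (∀ c ∈ cs, PySem.List.pyGetD xs c "" = PySem.List.pyGetD ys c "") →
      findColRev car xs cs = findColRev car ys cs := by
  intro cs
  induction cs with
  | nil => intro _; rfl
  | cons c rest ih =>
    intro h
    simp only [findColRev, h c (by simp)]
    split
    · rfl
    · exact ih (fun c hc => h c (by simp [hc]))

-- findRowRev only looks at the rows whose indices are in its list
theorem findRowRev_congr (car : String) (xs ys : List (List String)) :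
    ∀ ls : List Int, (∀ l ∈ ls, PySem.List.pyGetD xs l [] = PySem.List.pyGetD ys l []) →
      findRowRev car xs ls = findRowRev car ys ls := by
  intro ls
  induction ls with
  | nil => intro _; rfl
  | cons l rest ih =>
    intro h
    simp only [findRowRev, h l (by simp)]
    split
    · rfl
    · exact ih (fun l hl => h l (by simp [hl]))

-- B's column scan of a whole row (the value fed to it by findRowRev)
def colB (car : String) (row : List String) : Option Int :=
  findColRev car row (PySem.List.pyRange ((row.length : Int) - 1) (-1) (-1))

theorem colB_eq (car : String) (row : List String) :
    findColRev car row (PySem.List.pyRange ((row.length : Int) - 1) (-1) (-1)) =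
      colB car row := rfl

theorem colB_snoc (car : String) (row : List String) (x : String) :
    colB car (row ++ [x]) =
      if x = car then some (row.length : Int) else colB car row := by
  unfold colB
  rw [show (((row ++ [x]).length : Int) - 1) = (row.length : Int) by simp,
      PySem.List.pyRange_neg_one_cons (a := (row.length : Int)) (b := -1) (by omega)]
  simp only [findColRev, pvGetD_append_last]
  by_cases hx : x = car
  · simp [hx]
  · rw [if_neg hx, if_neg hx]
    exact findColRev_congr car (row ++ [x]) row _ (fun c hc => by
      rw [PySem.List.mem_pyRange_neg_one] at hc
      exact pvGetD_append_left row [x] c "" (by omega) (by omega))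

theorem colB_eq_none_iff (car : String) (row : List String) :
    colB car row = none ↔ car ∉ row := by
  induction row using List.reverseRecOn with
  | nil =>
    unfold colB
    rw [show ((([] : List String).length : Int) - 1) = -1 by simp,
        PySem.List.pyRange_neg_one_eq_nil (a := -1) (b := -1) (by omega)]
    simp [findColRev]
  | append_singleton row x ih =>
    rw [colB_snoc]
    by_cases hx : x = car
    · simp [hx]
    · have hcx : ¬ car = x := fun h => hx h.symm
      simp only [if_neg hx, ih, List.mem_append, List.mem_singleton]
      tauto

-- the inner A fold keeps the first component and threads the second
theorem innerA_fst (car : String) (row : List String) :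
    ∀ (cs : List Int) (init : Option Int × Option Int),
      cs.foldl (fun (t : Option Int × Option Int) c =>
          if car = PySem.List.pyGetD row c "" then (t.1, some c) else t) init =
      (init.1, cs.foldl (fun (u : Option Int) c =>
          if car = PySem.List.pyGetD row c "" then some c else u) init.2) := by
  intro cs
  induction cs with
  | nil => intro init; rfl
  | cons c rest ih =>
    intro init
    simp only [List.foldl_cons, ih]
    split <;> rfl

-- A's inner column scan, expressed through B's backward scan
theorem innerA_eq_colB (car : String) (row : List String) :
    ∀ s : Option Int,
      (PySem.List.pyRange 0 (row.length : Int) 1).foldl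
        (fun (u : Option Int) c =>
          if car = PySem.List.pyGetD row c "" then some c else u) s =
      (match colB car row with | some c => some c | none => s) := by
  induction row using List.reverseRecOn with
  | nil =>
    intro s
    unfold colB
    rw [show ((([] : List String).length : Int) - 1) = -1 by simp,
        PySem.List.pyRange_neg_one_eq_nil (a := -1) (b := -1) (by omega),
        show ((([] : List String).length : Int)) = 0 by simp,
        PySem.List.pyRange_one_eq_nil (a := 0) (b := 0) (by omega)]
    rfl
  | append_singleton row x ih =>
    intro s
    have hcongr := PySem.List.foldl_congr_mem (PySem.List.pyRange 0 (row.length : Int) 1)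
      (fun (u : Option Int) c =>
        if car = PySem.List.pyGetD (row ++ [x]) c "" then some c else u)
      (fun (u : Option Int) c =>
        if car = PySem.List.pyGetD row c "" then some c else u)
      s
      (fun u c hc => by
        rw [PySem.List.mem_pyRange_one] at hc
        simp only [pvGetD_append_left row [x] c "" (by omega) (by omega)])
    rw [show (((row ++ [x]).length : Int)) = (row.length : Int) + 1 by simp,
        PySem.List.pyRange_one_succ_right (a := 0) (b := (row.length : Int)) (by omega),
        List.foldl_append, hcongr, colB_snoc]
    simp only [List.foldl_cons, List.foldl_nil, pvGetD_append_last, ih s]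
    by_cases hx : x = car
    · simp [hx]
    · rw [if_neg (fun h => hx h.symm), if_neg hx]

-- A's whole forward sweep, expressed through B's backward search
theorem astate_eq_bres (car : String) (chave : List (List String)) :
    (PySem.List.pyRange 0 (chave.length : Int) 1).foldl
      (fun (s : Option Int × Option Int) l =>
        if car ∈ PySem.List.pyGetD chave l [] then
          (PySem.List.pyRange 0 (((PySem.List.pyGetD chave l []).length : Int)) 1).foldl
            (fun (t : Option Int × Option Int) c =>
              if car = PySem.List.pyGetD (PySem.List.pyGetD chave l []) c "" then (t.1, some c)
              else t)
            (some l, s.2)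
        else s)
      (none, none) =
    (match findRowRev car chave
        (PySem.List.pyRange ((chave.length : Int) - 1) (-1) (-1)) with
     | some (l, c) => (some l, some c)
     | none => (none, none)) := by
  induction chave using List.reverseRecOn with
  | nil =>
    rw [show ((([] : List (List String)).length : Int) - 1) = -1 by simp,
        PySem.List.pyRange_neg_one_eq_nil (a := -1) (b := -1) (by omega),
        show ((([] : List (List String)).length : Int)) = 0 by simp,
        PySem.List.pyRange_one_eq_nil (a := 0) (b := 0) (by omega)]
    rfl
  | append_singleton chave row ih =>
    have hcongr := PySem.List.foldl_congr_mem (PySem.List.pyRange 0 (chave.length : Int) 1)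
      (fun (s : Option Int × Option Int) l =>
        if car ∈ PySem.List.pyGetD (chave ++ [row]) l [] then
          (PySem.List.pyRange 0 (((PySem.List.pyGetD (chave ++ [row]) l []).length : Int)) 1).foldl
            (fun (t : Option Int × Option Int) c =>
              if car = PySem.List.pyGetD (PySem.List.pyGetD (chave ++ [row]) l []) c "" then
                (t.1, some c)
              else t)
            (some l, s.2)
        else s)
      (fun (s : Option Int × Option Int) l =>
        if car ∈ PySem.List.pyGetD chave l [] then
          (PySem.List.pyRange 0 (((PySem.List.pyGetD chave l []).length : Int)) 1).foldl
            (fun (t : Option Int × Option Int) c =>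
              if car = PySem.List.pyGetD (PySem.List.pyGetD chave l []) c "" then (t.1, some c)
              else t)
            (some l, s.2)
        else s)
      (none, none)
      (fun s l hl => by
        rw [PySem.List.mem_pyRange_one] at hl
        simp only [pvGetD_append_left chave [row] l [] (by omega) (by omega)])
    rw [show (((chave ++ [row]).length : Int)) = (chave.length : Int) + 1 by simp,
        PySem.List.pyRange_one_succ_right (a := 0) (b := (chave.length : Int)) (by omega),
        List.foldl_append, hcongr, ih,
        show ((chave.length : Int) + 1 - 1) = (chave.length : Int) by ring,
        PySem.List.pyRange_neg_one_cons (a := (chave.length : Int)) (b := -1) (by omega)]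
    simp only [findRowRev, List.foldl_cons, List.foldl_nil, pvGetD_append_last]
    rw [findRowRev_congr car (chave ++ [row]) chave _ (fun l hl => by
          rw [PySem.List.mem_pyRange_neg_one] at hl
          exact pvGetD_append_left chave [row] l [] (by omega) (by omega)),
        colB_eq]
    by_cases hmem : car ∈ row
    · rw [if_pos hmem, innerA_fst, innerA_eq_colB]
      have hne : colB car row ≠ none := by
        rw [Ne, colB_eq_none_iff]; simpa using hmem
      obtain ⟨c, hc⟩ := Option.ne_none_iff_exists'.mp hne
      rw [hc]
    · rw [if_neg hmem, (colB_eq_none_iff car row).mpr hmem]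

-- B finds nothing exactly when car occurs nowhere
theorem bres_eq_none_iff (car : String) (chave : List (List String)) :
    findRowRev car chave (PySem.List.pyRange ((chave.length : Int) - 1) (-1) (-1)) = none ↔
      ∀ row ∈ chave, car ∉ row := by
  induction chave using List.reverseRecOn with
  | nil =>
    rw [show ((([] : List (List String)).length : Int) - 1) = -1 by simp,
        PySem.List.pyRange_neg_one_eq_nil (a := -1) (b := -1) (by omega)]
    simp [findRowRev]
  | append_singleton chave row ih =>
    rw [show (((chave ++ [row]).length : Int) - 1) = (chave.length : Int) by simp,
        PySem.List.pyRange_neg_one_cons (a := (chave.length : Int)) (b := -1) (by omega)]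
    simp only [findRowRev, pvGetD_append_last]
    rw [findRowRev_congr car (chave ++ [row]) chave _ (fun l hl => by
          rw [PySem.List.mem_pyRange_neg_one] at hl
          exact pvGetD_append_left chave [row] l [] (by omega) (by omega)),
        colB_eq]
    rcases hcol : colB car row with _ | c
    · have hmem : car ∉ row := (colB_eq_none_iff car row).mp hcol
      simp only [ih, List.mem_append, List.mem_singleton]
      constructor
      · intro h r hr
        rcases hr with h1 | h2
        · exact h r h1
        · rw [h2]; exact hmem
      · intro h r hr
        exact h r (Or.inl hr)
    · have hmem : car ∈ row := by
        by_contra hn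
        rw [(colB_eq_none_iff car row).mpr hn] at hcol
        exact Option.some_ne_none c hcol.symm
      constructor
      · intro h
        exact absurd h (by simp)
      · intro hall
        exact absurd hmem (hall row (by simp))

-- ===== VERDICT (by name: the statement is the Claim_ definition above) =====
theorem encontra_pos_spec : Claim_equal_encontra_pos := by
  intro car chave _ hpre
  unfold Spec_encontra_pos encontra_pos encontra_pos_alt
  rw [astate_eq_bres]
  obtain ⟨row, hrow, hcar⟩ := hpre
  have hne : findRowRev car chave
      (PySem.List.pyRange ((chave.length : Int) - 1) (-1) (-1)) ≠ none := by
    rw [Ne, bres_eq_none_iff]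
    intro h; exact h row hrow hcar
  obtain ⟨⟨l, c⟩, hlc⟩ := Option.ne_none_iff_exists'.mp hne
  rw [hlc]
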